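-- pv_equiv track=rewrite | github.com/wenkuuk/Row_Transposition_Cipher | INCS741_2nd_Assignment.py | Encrypted
-- ===== SOURCE A (Python) =====
-- def Encrypted(combine_dict, msg_filled,key):
-- 	#create an array and its length is as same as that of key
-- 	Array = [""] * len(key)
-- 	for column_length in range (len(key)): #Run how many times in column
-- 		msg_length = column_length
-- 		while msg_length < len(msg_filled):
-- 			Array[column_length] += msg_filled[msg_length] # Store message string value to array
-- 			msg_length = msg_length + len(key) 	       # The message pointer adds the key length
--
-- 		# Create a dictionary that has pairs of key and value
-- 		for x in range (len(key)):
-- 			dict_x = {key[column_length] : Array[column_length]}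
-- 			combine_dict.update(dict_x)
-- 			x +=1
-- 	return combine_dict
-- ===== SOURCE B (Python) =====
-- def Encrypted(combine_dict, msg_filled, key):
--     n = len(key)
--     if n == 0:
--         return combine_dict
--     # one pass: deal each character into its column by index mod n
--     cols = [""] * n
--     i = 0
--     for ch in msg_filled:
--         cols[i % n] += ch
--         i += 1
--     # one write per column (duplicate key characters: last column wins, as in A)
--     for j in range(n):
--         combine_dict[key[j]] = cols[j]
--     return combine_dict
-- ===== Notes on version B (the rewrite author's own statement) =====
-- stated objective: alternative
-- what changed: A builds each column by striding through the message with step len(key) and redundantly re-updates the dict len(key) times per column; B deals the message into all columns in one modular-index pass and writes each column to the dict exactly once.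
import Mathlib
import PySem

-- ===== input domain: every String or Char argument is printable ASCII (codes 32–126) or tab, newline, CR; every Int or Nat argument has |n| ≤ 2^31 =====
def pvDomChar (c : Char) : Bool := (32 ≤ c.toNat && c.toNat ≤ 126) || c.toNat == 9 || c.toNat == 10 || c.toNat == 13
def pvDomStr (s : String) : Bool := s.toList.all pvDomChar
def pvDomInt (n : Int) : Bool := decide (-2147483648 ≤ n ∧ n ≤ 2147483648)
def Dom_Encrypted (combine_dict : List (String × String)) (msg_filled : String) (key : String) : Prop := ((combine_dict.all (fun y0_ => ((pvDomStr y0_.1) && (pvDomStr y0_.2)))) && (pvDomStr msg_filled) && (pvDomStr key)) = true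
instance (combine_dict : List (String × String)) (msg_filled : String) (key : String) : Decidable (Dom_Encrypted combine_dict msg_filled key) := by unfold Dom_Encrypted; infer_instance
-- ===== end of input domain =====

-- B replaces A's per-column striding (with its redundant len(key)-times repeated dict update)
-- by a single modular deal pass over the message plus one dict write per column.
-- Both Pythons mutate combine_dict in place (B performs the same mutation); the equivalence
-- proved here is about the returned mapping.

-- ===== PORT A =====
-- the 'while msg_length < len(msg_filled)' loop; the '0 < klen' conjunct only makes the
-- transliteration total (in A the loop body is only reached when len(key) ≥ 1)
def pvEncWhile (msg : List Char) (klen m : Nat) (acc : List Char) : List Char :=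
  if h : m < msg.length ∧ 0 < klen then
    pvEncWhile msg klen (m + klen) (acc ++ [msg.getD m ' '])
  else acc
termination_by msg.length - m
decreasing_by omega

def Encrypted (combine_dict : List (String × String)) (msg_filled : String) (key : String) : List (String × String) :=
  ((List.range key.toList.length).foldl
    (fun (st : List (List Char) × PySem.Dict String String) col =>
      let arr := st.1.set col (pvEncWhile msg_filled.toList key.toList.length col (st.1.getD col []))
      let d := (List.range key.toList.length).foldl
        (fun d _ => d.insert (String.mk [key.toList.getD col ' ']) (String.mk (arr.getD col []))) st.2
      (arr, d))
    (List.replicate key.toList.length [], PySem.Dict.mk combine_dict)).2.items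

-- ===== PORT B =====
def Encrypted_alt (combine_dict : List (String × String)) (msg_filled : String) (key : String) : List (String × String) :=
  if key.toList.length = 0 then combine_dict
  else
    ((List.range key.toList.length).foldl
      (fun d j => d.insert (String.mk [key.toList.getD j ' '])
        (String.mk (((msg_filled.toList.foldl
          (fun (st : Nat × List (List Char)) ch =>
            (st.1 + 1, st.2.set (st.1 % key.toList.length) (st.2.getD (st.1 % key.toList.length) [] ++ [ch])))
          (0, List.replicate key.toList.length [])).2).getD j [])))
      (PySem.Dict.mk combine_dict)).items

-- ===== PRECONDITION & SPEC =====
def Spec_Encrypted (combine_dict : List (String × String)) (msg_filled : String) (key : String) (out : List (String × String)) : Prop := out = Encrypted_alt combine_dict msg_filled key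
instance (combine_dict : List (String × String)) (msg_filled : String) (key : String) (out : List (String × String)) : Decidable (Spec_Encrypted combine_dict msg_filled key out) := by unfold Spec_Encrypted; infer_instance

-- ===== CLAIM (what is proved, stated in full; the proofs are below) =====
def Claim_equal_Encrypted : Prop := ∀ (combine_dict : List (String × String)) (msg_filled : String) (key : String), Dom_Encrypted combine_dict msg_filled key → Spec_Encrypted combine_dict msg_filled key (Encrypted combine_dict msg_filled key)

-- ===== LEMMAS AND PROOFS =====

-- the column with indices m, m+klen, m+2*klen, … of msg (what A's while loop appends)
def pvColFrom (msg : List Char) (klen m : Nat) : List Char :=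
  if h : m < msg.length ∧ 0 < klen then
    msg.getD m ' ' :: pvColFrom msg klen (m + klen)
  else []
termination_by msg.length - m
decreasing_by omega

-- the chars of l whose position (counted from b) is ≡ j mod klen (what B's deal pass appends)
def pvColMod (l : List Char) (klen j b : Nat) : List Char :=
  match l with
  | [] => []
  | c :: rest => (if b % klen = j then [c] else []) ++ pvColMod rest klen j (b + 1)

theorem pvEncWhile_eq (msg : List Char) (klen m : Nat) (acc : List Char) :
    pvEncWhile msg klen m acc = acc ++ pvColFrom msg klen m := by
  fun_induction pvEncWhile msg klen m acc with
  | case1 m acc h ih =>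
      rw [ih, show pvColFrom msg klen m = msg.getD m ' ' :: pvColFrom msg klen (m + klen) by
        rw [pvColFrom, dif_pos h]]
      simp
  | case2 m acc h =>
      rw [show pvColFrom msg klen m = [] by rw [pvColFrom, dif_neg h]]
      simp

theorem pvColFrom_shift (c : Char) (rest : List Char) (klen : Nat) (m : Nat) :
    pvColFrom (c :: rest) klen (m + 1) = pvColFrom rest klen m := by
  fun_induction pvColFrom rest klen m with
  | case1 m h ih =>
      rw [pvColFrom, dif_pos (by simp only [List.length_cons]; omega)]
      simp only [List.getD, List.getElem?_cons_succ]
      rw [show m + 1 + klen = m + klen + 1 by omega, ih]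
  | case2 m h =>
      rw [pvColFrom, dif_neg (by simp only [List.length_cons]; omega)]

theorem pvColMod_eq_colFrom (klen j : Nat) (hk : 0 < klen) (hj : j < klen) :
    ∀ (l : List Char) (b : Nat),
      pvColMod l klen j b = pvColFrom l klen ((j + klen - b % klen) % klen) := by
  intro l
  induction l with
  | nil => intro b; rw [pvColMod, pvColFrom, dif_neg (by simp)]
  | cons c rest ih =>
    intro b
    have hbm : b % klen < klen := Nat.mod_lt _ hk
    have hb1 : (b + 1) % klen = (b % klen + 1) % klen := by
      rw [Nat.add_mod b 1, Nat.add_mod (b % klen) 1, Nat.mod_eq_of_lt hbm]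
    rw [pvColMod]
    by_cases hbj : b % klen = j
    · have hd : (j + klen - b % klen) % klen = 0 := by
        rw [hbj, show j + klen - j = klen by omega, Nat.mod_self]
      have hd' : (j + klen - (b + 1) % klen) % klen = klen - 1 := by
        rw [hb1, hbj]
        by_cases h : j + 1 < klen
        · rw [Nat.mod_eq_of_lt h, Nat.mod_eq_of_lt (by omega)]
          omega
        · rw [show j + 1 = klen by omega, Nat.mod_self, Nat.sub_zero,
            Nat.add_mod_right, Nat.mod_eq_of_lt hj]
          omega
      have hunf : pvColFrom (c :: rest) klen 0
          = (c :: rest).getD 0 ' ' :: pvColFrom (c :: rest) klen (0 + klen) := by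
        rw [pvColFrom, dif_pos ⟨by simp, hk⟩]
      have hsh : pvColFrom (c :: rest) klen klen = pvColFrom rest klen (klen - 1) := by
        have h := pvColFrom_shift c rest klen (klen - 1)
        rwa [Nat.sub_add_cancel hk] at h
      rw [hd, ih (b + 1), hd', if_pos hbj, hunf, Nat.zero_add, hsh]
      simp
    · rw [if_neg hbj, List.nil_append, ih (b + 1)]
      suffices hsucc : (j + klen - b % klen) % klen
          = (j + klen - (b + 1) % klen) % klen + 1 by
        rw [hsucc, pvColFrom_shift]
      rcases Nat.lt_or_ge (b % klen) j with h2 | h2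
      · have hb' : (b + 1) % klen = b % klen + 1 := by
          rw [hb1, Nat.mod_eq_of_lt (by omega)]
        have e1 : (j + klen - b % klen) % klen = j - b % klen := by
          rw [Nat.mod_eq_sub_mod (by omega),
            show j + klen - b % klen - klen = j - b % klen by omega]
          exact Nat.mod_eq_of_lt (by omega)
        have e2 : (j + klen - (b % klen + 1)) % klen = j - (b % klen + 1) := by
          rw [Nat.mod_eq_sub_mod (by omega),
            show j + klen - (b % klen + 1) - klen = j - (b % klen + 1) by omega]
          exact Nat.mod_eq_of_lt (by omega)
        rw [hb', e1, e2]
        omega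
      · have h2' : j < b % klen := by omega
        have e1 : (j + klen - b % klen) % klen = j + klen - b % klen :=
          Nat.mod_eq_of_lt (by omega)
        by_cases h : b % klen + 1 = klen
        · have hb' : (b + 1) % klen = 0 := by rw [hb1, h, Nat.mod_self]
          rw [e1, hb', Nat.sub_zero, Nat.add_mod_right, Nat.mod_eq_of_lt hj]
          omega
        · have hb' : (b + 1) % klen = b % klen + 1 := by
            rw [hb1, Nat.mod_eq_of_lt (by omega)]
          have e2 : (j + klen - (b % klen + 1)) % klen = j + klen - (b % klen + 1) :=
            Nat.mod_eq_of_lt (by omega)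
          rw [e1, hb', e2]
          omega

theorem pvBfold (klen : Nat) (hk : 0 < klen) (j : Nat) (hj : j < klen) :
    ∀ (l : List Char) (b : Nat) (cs : List (List Char)), cs.length = klen →
      ((l.foldl (fun (st : Nat × List (List Char)) ch =>
          (st.1 + 1, st.2.set (st.1 % klen) (st.2.getD (st.1 % klen) [] ++ [ch])))
        (b, cs)).2).getD j []
      = cs.getD j [] ++ pvColMod l klen j b := by
  intro l
  induction l with
  | nil => intro b cs hcs; simp [pvColMod]
  | cons ch rest ih =>
    intro b cs hcs
    rw [List.foldl_cons, pvColMod]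
    have hset : (cs.set (b % klen) (cs.getD (b % klen) [] ++ [ch])).length = klen := by
      simp [hcs]
    rw [ih (b + 1) _ hset]
    by_cases hbj : b % klen = j
    · rw [if_pos hbj]
      rw [List.getD_eq_getElem?_getD, List.getElem?_set, if_pos hbj,
        if_pos (by omega), Option.getD_some, hbj]
      simp
    · rw [if_neg hbj]
      rw [List.getD_eq_getElem?_getD, List.getElem?_set, if_neg hbj,
        ← List.getD_eq_getElem?_getD]
      simp

theorem pvFoldInsertConst {α : Type} (k v : String) :
    ∀ (l : List α) (d : PySem.Dict String String), l ≠ [] →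
      l.foldl (fun d _ => d.insert k v) d = d.insert k v := by
  intro l
  induction l with
  | nil => intro d h; exact absurd rfl h
  | cons a l ih =>
    intro d _
    rw [List.foldl_cons]
    cases l with
    | nil => rfl
    | cons b l' =>
      rw [ih _ (by simp), PySem.Dict.insert_insert_self]

theorem pvGetD_replicate_nil (n i : Nat) :
    (List.replicate n ([] : List Char)).getD i [] = [] := by
  rw [List.getD_eq_getElem?_getD, List.getElem?_replicate]
  split <;> rfl

theorem pvAfold (msgL kcs : List Char) (hk : 0 < kcs.length) :
    ∀ (n s : Nat) (arr : List (List Char)) (d : PySem.Dict String String),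
      arr.length = kcs.length → s + n = kcs.length →
      ((List.range' s n 1).foldl
        (fun (st : List (List Char) × PySem.Dict String String) col =>
          let arr' := st.1.set col (pvEncWhile msgL kcs.length col (st.1.getD col []))
          let d' := (List.range' 0 kcs.length 1).foldl
            (fun d _ => d.insert (String.mk [kcs.getD col ' ']) (String.mk (arr'.getD col []))) st.2
          (arr', d'))
        (arr, d)).2
      = (List.range' s n 1).foldl
          (fun d col => d.insert (String.mk [kcs.getD col ' '])
            (String.mk (pvEncWhile msgL kcs.length col (arr.getD col [])))) d := by
  intro n
  induction n with
  | zero => intro s arr d _ _; rfl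
  | succ n ih =>
    intro s arr d harr hs
    rw [List.range'_succ, List.foldl_cons, List.foldl_cons]
    dsimp only
    have hrne : (List.range' 0 kcs.length 1) ≠ [] := by
      intro hcon
      have := congrArg List.length hcon
      simp only [List.length_range', List.length_nil] at this
      omega
    rw [pvFoldInsertConst _ _ _ _ hrne]
    have hA1s : (arr.set s (pvEncWhile msgL kcs.length s (arr.getD s []))).getD s []
        = pvEncWhile msgL kcs.length s (arr.getD s []) := by
      rw [List.getD_eq_getElem?_getD, List.getElem?_set, if_pos rfl,
        if_pos (by omega), Option.getD_some]
    rw [hA1s]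
    rw [ih (s + 1) _ _ (by simp [harr]) (by omega)]
    apply PySem.List.foldl_congr_mem
    intro acc col hcol
    have hscol : s + 1 ≤ col := (List.mem_range'_1.mp hcol).1
    have : (arr.set s (pvEncWhile msgL kcs.length s (arr.getD s []))).getD col []
        = arr.getD col [] := by
      rw [List.getD_eq_getElem?_getD, List.getElem?_set, if_neg (by omega),
        ← List.getD_eq_getElem?_getD]
    rw [this]

-- ===== VERDICT (by name: the statement is the Claim_ definition above) =====
theorem Encrypted_spec : Claim_equal_Encrypted := by
  intro cd msg key _
  unfold Spec_Encrypted Encrypted Encrypted_alt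
  by_cases hk : key.toList.length = 0
  · rw [hk, if_pos rfl]
    simp
  · rw [if_neg hk]
    have hk' : 0 < key.toList.length := Nat.pos_of_ne_zero hk
    rw [List.range_eq_range']
    rw [pvAfold msg.toList key.toList hk' key.toList.length 0 _ _ (by simp) (by omega)]
    congr 1
    apply PySem.List.foldl_congr_mem
    intro acc j hj
    have hjlt : j < key.toList.length := by
      have := (List.mem_range'_1.mp hj).2
      omega
    congr 1
    rw [pvGetD_replicate_nil, pvEncWhile_eq, List.nil_append]
    rw [pvBfold key.toList.length hk' j hjlt msg.toList 0 _ (by simp),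
      pvGetD_replicate_nil, List.nil_append]
    rw [pvColMod_eq_colFrom key.toList.length j hk' hjlt msg.toList 0,
      Nat.zero_mod, Nat.sub_zero, Nat.add_mod_right, Nat.mod_eq_of_lt hjlt]
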